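-- pv_equiv track=rewrite | github.com/NickMcCarthy101/notebooks_practice | signal_transformation/alp_signal_implementation.py | common_substring_list_static
-- ===== SOURCE A (Python) =====
-- def common_substring_list_static(str1, str2, min_match_len):
--     loop_len = min(len(str1), len(str2))
--     curr_match_len = 0
--     matched_strings = []
--     for i in range(loop_len):
--         if str1[i] == str2[i]:
--             curr_match_len+=1
--             if i == loop_len-1 and curr_match_len >= min_match_len:
--                 curr_matched_string = str1[(i-curr_match_len+1):(i+1)]
--                 matched_strings.append(curr_matched_string)
--         else:
--             if curr_match_len >= min_match_len:
--                 curr_matched_string = str1[(i-curr_match_len):i]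
--                 matched_strings.append(curr_matched_string)
--             curr_match_len = 0
--     return matched_strings
-- ===== SOURCE B (Python) =====
-- def common_substring_list_static(str1, str2, min_match_len):
--     # Split the aligned prefix at its mismatch positions; keep segments that are long enough.
--     n = min(len(str1), len(str2))
--     mismatches = [i for i in range(n) if str1[i] != str2[i]]
--     result = []
--     prev = 0
--     for m in mismatches:
--         if m - prev >= min_match_len:
--             result.append(str1[prev:m])
--         prev = m + 1
--     if prev < n and n - prev >= min_match_len:
--         result.append(str1[prev:n])
--     return result
-- ===== Notes on version B (the rewrite author's own statement) =====
-- stated objective: alternative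
-- what changed: Replaces A's single pass with a running match counter and two in-loop flush cases by a boundary decomposition: first collect the aligned mismatch positions, then emit the segment between consecutive boundaries when it is long enough, plus the trailing segment.
import Mathlib
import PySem

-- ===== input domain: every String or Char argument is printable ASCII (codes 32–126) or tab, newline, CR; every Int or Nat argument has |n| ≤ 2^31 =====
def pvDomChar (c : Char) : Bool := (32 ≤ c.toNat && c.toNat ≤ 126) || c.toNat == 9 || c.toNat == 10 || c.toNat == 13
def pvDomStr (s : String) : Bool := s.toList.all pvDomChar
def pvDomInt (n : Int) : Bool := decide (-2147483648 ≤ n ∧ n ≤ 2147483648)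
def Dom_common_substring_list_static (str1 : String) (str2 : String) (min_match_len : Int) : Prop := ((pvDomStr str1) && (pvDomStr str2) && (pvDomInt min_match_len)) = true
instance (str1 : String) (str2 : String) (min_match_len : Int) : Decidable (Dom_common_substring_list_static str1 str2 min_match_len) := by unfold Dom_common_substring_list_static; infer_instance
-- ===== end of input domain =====

-- B replaces A's running-counter pass (with its two in-loop flush cases) by a boundary
-- decomposition: collect the mismatch positions, then emit the segments between boundaries.

-- ===== PORT A =====
-- shared indexing helper `str1[i] == str2[i]`; both programs index only at i < min(len,len), where getD is Python-exact
def cslEq (s1 s2 : List Char) (i : Nat) : Bool := s1.getD i ' ' == s2.getD i ' '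

-- the `for i in range(loop_len)` loop of A, as index recursion over the same state (curr_match_len, matched_strings)
def cslA_loop (s1 s2 : List Char) (n : Nat) (m : Int) (i : Nat) (curr : Int) (acc : List String) : List String :=
  if i < n then
    if cslEq s1 s2 i then
      let curr' := curr + 1
      let acc' := if i = n - 1 ∧ m ≤ curr' then
          acc ++ [String.ofList (PySem.List.slice s1 (some ((i : Int) - curr' + 1)) (some ((i : Int) + 1)))]
        else acc
      cslA_loop s1 s2 n m (i+1) curr' acc'
    else
      let acc' := if m ≤ curr then
          acc ++ [String.ofList (PySem.List.slice s1 (some ((i : Int) - curr)) (some (i : Int)))]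
        else acc
      cslA_loop s1 s2 n m (i+1) 0 acc'
  else acc
termination_by n - i

def common_substring_list_static (str1 : String) (str2 : String) (min_match_len : Int) : List String :=
  cslA_loop str1.toList str2.toList (min str1.toList.length str2.toList.length) min_match_len 0 0 []

-- ===== PORT B =====
-- `[i for i in range(n) if str1[i] != str2[i]]` (n = min of the lengths is ≥ 0, so List.range n is exact)
def cslB_mismatches (s1 s2 : List Char) (n : Nat) : List Nat :=
  (List.range n).filter (fun i => !(cslEq s1 s2 i))

-- the `for m in mismatches` loop of B over the state (prev, result)
def cslB_fold (s1 : List Char) (mml : Int) (ms : List Nat) (prev : Nat) (acc : List String) : Nat × List String :=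
  match ms with
  | [] => (prev, acc)
  | j :: rest =>
      cslB_fold s1 mml rest (j+1)
        (if mml ≤ (j : Int) - (prev : Int) then
            acc ++ [String.ofList (PySem.List.slice s1 (some (prev : Int)) (some (j : Int)))]
          else acc)

-- the trailing `if prev < n and n - prev >= min_match_len` step of B
def cslB_finish (s1 : List Char) (mml : Int) (n : Nat) (st : Nat × List String) : List String :=
  if st.1 < n ∧ mml ≤ (n : Int) - (st.1 : Int) then
    st.2 ++ [String.ofList (PySem.List.slice s1 (some (st.1 : Int)) (some (n : Int)))]
  else st.2

def common_substring_list_static_alt (str1 : String) (str2 : String) (min_match_len : Int) : List String :=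
  let s1 := str1.toList
  let s2 := str2.toList
  let n := min s1.length s2.length
  cslB_finish s1 min_match_len n (cslB_fold s1 min_match_len (cslB_mismatches s1 s2 n) 0 [])

-- ===== PRECONDITION & SPEC =====
def Spec_common_substring_list_static (str1 : String) (str2 : String) (min_match_len : Int) (out : List String) : Prop := out = common_substring_list_static_alt str1 str2 min_match_len
instance (str1 : String) (str2 : String) (min_match_len : Int) (out : List String) : Decidable (Spec_common_substring_list_static str1 str2 min_match_len out) := by unfold Spec_common_substring_list_static; infer_instance

-- ===== CLAIM (what is proved, stated in full; the proofs are below) =====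
def Claim_equal_common_substring_list_static : Prop := ∀ (str1 : String) (str2 : String) (min_match_len : Int), Dom_common_substring_list_static str1 str2 min_match_len → Spec_common_substring_list_static str1 str2 min_match_len (common_substring_list_static str1 str2 min_match_len)

-- ===== LEMMAS AND PROOFS =====

-- splitting the mismatch list of the range [i, n) at its head position i
theorem csl_msRange_cons (s1 s2 : List Char) (n i : Nat) (h : i < n) :
    (List.range' i (n - i)).filter (fun t => !(cslEq s1 s2 t)) =
      (if cslEq s1 s2 i then [] else [i]) ++ (List.range' (i+1) (n - (i+1))).filter (fun t => !(cslEq s1 s2 t)) := by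
  have hn : n - i = (n - (i+1)) + 1 := by omega
  rw [hn, List.range'_succ, List.filter_cons]
  by_cases hq : cslEq s1 s2 i <;> simp [hq]

-- main invariant: at position i with curr = i - prev (all of [prev, i) matching is not even
-- needed: A's state is determined by the counter), A's remaining loop equals B's remaining
-- fold-plus-finish over the mismatches of [i, n)
theorem cslAB (s1 s2 : List Char) (n : Nat) (mml : Int) :
    ∀ g i prev acc, n - i = g → prev ≤ i → i ≤ n → (i = n → prev = n) →
    cslA_loop s1 s2 n mml i ((i : Int) - (prev : Int)) acc =
      cslB_finish s1 mml n
        (cslB_fold s1 mml ((List.range' i (n - i)).filter (fun t => !(cslEq s1 s2 t))) prev acc) := by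
  intro g
  induction g using Nat.strong_induction_on with
  | _ g ih =>
    intro i prev acc hg h1 h2 h3
    by_cases hin : i < n
    · rw [cslA_loop]
      simp only [hin, if_true]
      rw [csl_msRange_cons s1 s2 n i hin]
      by_cases heq : cslEq s1 s2 i
      · -- match at i: the mismatch list is unchanged
        simp only [heq, if_true, List.nil_append]
        by_cases hend : i + 1 = n
        · -- last loop iteration: A's end-of-loop flush vs B's trailing segment
          have hi : i = n - 1 := by omega
          have hrest : (List.range' (i+1) (n - (i+1))).filter (fun t => !(cslEq s1 s2 t)) = [] := by
            have : n - (i+1) = 0 := by omega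
            simp [this]
          rw [hrest]
          have hA : cslA_loop s1 s2 n mml (i+1) ((i:Int) - (prev:Int) + 1)
              (if i = n - 1 ∧ mml ≤ (i:Int) - (prev:Int) + 1 then
                  acc ++ [String.ofList (PySem.List.slice s1 (some ((i : Int) - ((i:Int) - (prev:Int) + 1) + 1)) (some ((i : Int) + 1)))]
                else acc) = (if i = n - 1 ∧ mml ≤ (i:Int) - (prev:Int) + 1 then
                  acc ++ [String.ofList (PySem.List.slice s1 (some ((i : Int) - ((i:Int) - (prev:Int) + 1) + 1)) (some ((i : Int) + 1)))]
                else acc) := by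
            rw [cslA_loop]; simp [hend]
          rw [hA]
          rw [cslB_fold, cslB_finish]
          have hlt : prev < n := by omega
          have hc : (i = n - 1 ∧ mml ≤ (i:Int) - (prev:Int) + 1) ↔ (prev < n ∧ mml ≤ (n : Int) - (prev : Int)) := by
            constructor
            · rintro ⟨_, hb⟩; refine ⟨hlt, ?_⟩; have : ((i:Int)) = (n:Int) - 1 := by omega
              linarith
            · rintro ⟨_, hb⟩; refine ⟨hi, ?_⟩; have : ((i:Int)) = (n:Int) - 1 := by omega
              linarith
          have e1 : ((i : Int) - ((i:Int) - (prev:Int) + 1) + 1) = (prev : Int) := by ring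
          have e2 : ((i : Int) + 1) = (n : Int) := by omega
          rw [e1, e2]
          split_ifs with ha hb hb
          · rfl
          · exact absurd (hc.mp ha) hb
          · exact absurd (hc.mpr hb) ha
          · rfl
        · -- not the last: no flush, counter grows
          have hne : ¬ (i = n - 1 ∧ mml ≤ (i:Int) - (prev:Int) + 1) := by
            rintro ⟨ha, _⟩; omega
          simp only [hne, if_false]
          have e : ((i:Int) - (prev:Int) + 1) = (((i+1 : Nat) : Int) - (prev : Int)) := by push_cast; ring
          rw [e, ih (n - (i+1)) (by omega) (i+1) prev acc rfl (by omega) (by omega) (by omega)]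
      · -- mismatch at i: A flushes [prev, i) and resets; B consumes boundary i
        have hq : cslEq s1 s2 i = false := by simpa using heq
        simp only [hq, Bool.false_eq_true, if_false, List.singleton_append]
        rw [cslB_fold]
        have e1 : ((i : Int) - ((i:Int) - (prev:Int))) = (prev : Int) := by ring
        have e2 : ((0 : Int)) = (((i+1 : Nat) : Int) - ((i+1 : Nat) : Int)) := by ring
        rw [e1]
        have := ih (n - (i+1)) (by omega) (i+1) (i+1)
          (if mml ≤ (i : Int) - (prev : Int) then
              acc ++ [String.ofList (PySem.List.slice s1 (some (prev : Int)) (some (i : Int)))]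
            else acc) rfl (le_refl _) (by omega) (by omega)
        rw [← e2] at this
        exact this
    · -- i = n: both sides are acc
      have hpn : prev = n := h3 (by omega)
      rw [cslA_loop]
      have hz : n - i = 0 := by omega
      simp only [hin, if_false, hz]
      rw [cslB_finish]
      simp [cslB_fold, hpn]

-- ===== VERDICT (by name: the statement is the Claim_ definition above) =====
theorem common_substring_list_static_spec : Claim_equal_common_substring_list_static := by
  intro str1 str2 m _
  unfold Spec_common_substring_list_static common_substring_list_static common_substring_list_static_alt
  simp only [cslB_mismatches, List.range_eq_range']
  have := cslAB str1.toList str2.toList (min str1.toList.length str2.toList.length) m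
    (min str1.toList.length str2.toList.length - 0) 0 0 [] rfl (by omega) (by omega) (by omega)
  simpa using this
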